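-- pv_equiv track=rewrite | github.com/YupenBob/clover-tools | file-converter-app/converter.py | validate_conversion
-- ===== SOURCE A (Python) =====
-- def get_supported_formats():
--     """Return supported formats by category."""
--     return {
--         'document': ['pdf', 'docx', 'txt', 'html', 'rtf', 'odt'],
--         'image': ['jpg', 'jpeg', 'png', 'webp', 'svg', 'gif', 'bmp', 'tiff'],
--         'audio_video': ['mp4', 'avi', 'mov', 'mkv', 'flv', 'mp3', 'wav', 'aac', 'flac', 'ogg'],
--         'spreadsheet': ['xlsx', 'xls', 'csv', 'json', 'tsv']
--     }
--
-- def validate_conversion(source_ext, target_format):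
--     """Validate if conversion from source to target is allowed."""
--     source_ext = source_ext.lower()
--     target_format = target_format.lower()
--
--     # Get category of source file
--     categories = get_supported_formats()
--     source_category = None
--
--     for category, formats in categories.items():
--         if source_ext in formats:
--             source_category = category
--             break
--
--     if not source_category:
--         return False, "Unsupported source file type"
--
--     # Check if target format is in the same category
--     if target_format not in categories[source_category]:
--         return False, f"Cannot convert {source_ext} to {target_format} - different categories"
--
--     return True, "Valid conversion"
-- ===== SOURCE B (Python) =====
-- def get_supported_formats():
--     """Return supported formats by category."""
--     return {
--         'document': ['pdf', 'docx', 'txt', 'html', 'rtf', 'odt'],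
--         'image': ['jpg', 'jpeg', 'png', 'webp', 'svg', 'gif', 'bmp', 'tiff'],
--         'audio_video': ['mp4', 'avi', 'mov', 'mkv', 'flv', 'mp3', 'wav', 'aac', 'flac', 'ogg'],
--         'spreadsheet': ['xlsx', 'xls', 'csv', 'json', 'tsv']
--     }
--
-- def validate_conversion(source_ext, target_format):
--     """Category-free formulation: a conversion is valid iff some single format list
--     contains BOTH formats; the source is supported iff some list contains it.
--     Correct because the format lists are pairwise disjoint."""
--     s = source_ext.lower()
--     t = target_format.lower()
--     lists = list(get_supported_formats().values())
--     if not any(s in fl for fl in lists):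
--         return False, "Unsupported source file type"
--     if any(s in fl and t in fl for fl in lists):
--         return True, "Valid conversion"
--     return False, f"Cannot convert {s} to {t} - different categories"
-- ===== Notes on version B (the rewrite author's own statement) =====
-- stated objective: simpler
-- what changed: B drops category names entirely: instead of A's compute-source-category-then-index-and-test pipeline, it answers with two existential predicates over the format lists - 'some list contains the source' and 'some list contains both formats' - which is equivalent because the lists are pairwise disjoint.
import Mathlib
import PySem

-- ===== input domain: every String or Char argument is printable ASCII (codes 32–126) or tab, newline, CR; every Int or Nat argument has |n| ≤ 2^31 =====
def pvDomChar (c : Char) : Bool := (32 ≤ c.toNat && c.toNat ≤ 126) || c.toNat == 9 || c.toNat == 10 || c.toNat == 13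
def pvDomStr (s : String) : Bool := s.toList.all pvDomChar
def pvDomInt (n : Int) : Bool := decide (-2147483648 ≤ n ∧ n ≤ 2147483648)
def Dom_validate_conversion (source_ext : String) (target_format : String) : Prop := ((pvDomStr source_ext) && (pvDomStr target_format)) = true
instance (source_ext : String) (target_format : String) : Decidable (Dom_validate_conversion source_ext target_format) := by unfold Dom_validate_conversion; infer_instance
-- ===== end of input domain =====

-- B is a category-free reformulation (objective: simpler): two existential scans over the
-- format lists replace A's compute-category-then-index-and-test pipeline; equivalent because
-- the format lists are pairwise disjoint.

-- get_supported_formats(): the module-level table both implementations call.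
def get_supported_formats : PySem.Dict String (List String) :=
  PySem.Dict.ofList
    [("document", ["pdf", "docx", "txt", "html", "rtf", "odt"]),
     ("image", ["jpg", "jpeg", "png", "webp", "svg", "gif", "bmp", "tiff"]),
     ("audio_video", ["mp4", "avi", "mov", "mkv", "flv", "mp3", "wav", "aac", "flac", "ogg"]),
     ("spreadsheet", ["xlsx", "xls", "csv", "json", "tsv"])]

-- ===== PORT A =====
-- A's for-loop with break: first category whose format list contains x.
def pvLoopCat (x : String) : Option String :=
  get_supported_formats.items.foldl
    (fun acc p =>
      match acc with
      | some c => some c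
      | none => if x ∈ p.2 then some p.1 else none)
    none

def validate_conversion (source_ext : String) (target_format : String) : Bool × String :=
  let s := PySem.Str.lower source_ext
  let t := PySem.Str.lower target_format
  match pvLoopCat s with
  | none => (false, "Unsupported source file type")
  | some c =>
    -- categories[source_category]; `.getD []` only totalises the KeyError case, unreachable here
    if t ∈ (get_supported_formats.get? c).getD [] then (true, "Valid conversion")
    else (false, "Cannot convert " ++ s ++ " to " ++ t ++ " - different categories")

-- ===== PORT B =====
-- Source B: lists = list(get_supported_formats().values()); two `any(...)` scans, no categories.
def validate_conversion_alt (source_ext : String) (target_format : String) : Bool × String :=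
  let s := PySem.Str.lower source_ext
  let t := PySem.Str.lower target_format
  let lists := get_supported_formats.values
  if !(lists.any (fun fl => fl.contains s)) then
    (false, "Unsupported source file type")
  else if lists.any (fun fl => fl.contains s && fl.contains t) then
    (true, "Valid conversion")
  else
    (false, "Cannot convert " ++ s ++ " to " ++ t ++ " - different categories")

-- ===== PRECONDITION & SPEC =====
def Spec_validate_conversion (source_ext : String) (target_format : String) (out : Bool × String) : Prop := out = validate_conversion_alt source_ext target_format
instance (source_ext : String) (target_format : String) (out : Bool × String) : Decidable (Spec_validate_conversion source_ext target_format out) := by unfold Spec_validate_conversion; infer_instance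

-- ===== CLAIM (what is proved, stated in full; the proofs are below) =====
def Claim_equal_validate_conversion : Prop := ∀ (source_ext : String) (target_format : String), Dom_validate_conversion source_ext target_format → Spec_validate_conversion source_ext target_format (validate_conversion source_ext target_format)

-- ===== LEMMAS AND PROOFS =====
def pvL1 : List String := ["pdf", "docx", "txt", "html", "rtf", "odt"]
def pvL2 : List String := ["jpg", "jpeg", "png", "webp", "svg", "gif", "bmp", "tiff"]
def pvL3 : List String := ["mp4", "avi", "mov", "mkv", "flv", "mp3", "wav", "aac", "flac", "ogg"]
def pvL4 : List String := ["xlsx", "xls", "csv", "json", "tsv"]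

-- The 29 formats are pairwise distinct, so every string is classified into exactly one of
-- five cases: unknown, or member of exactly one list (with A's scan returning that category).
lemma pv_master (x : String) :
    (pvLoopCat x = none ∧ pvL1.contains x = false ∧ pvL2.contains x = false ∧ pvL3.contains x = false ∧ pvL4.contains x = false)
    ∨ (pvLoopCat x = some "document" ∧ pvL1.contains x = true ∧ pvL2.contains x = false ∧ pvL3.contains x = false ∧ pvL4.contains x = false)
    ∨ (pvLoopCat x = some "image" ∧ pvL1.contains x = false ∧ pvL2.contains x = true ∧ pvL3.contains x = false ∧ pvL4.contains x = false)
    ∨ (pvLoopCat x = some "audio_video" ∧ pvL1.contains x = false ∧ pvL2.contains x = false ∧ pvL3.contains x = true ∧ pvL4.contains x = false)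
    ∨ (pvLoopCat x = some "spreadsheet" ∧ pvL1.contains x = false ∧ pvL2.contains x = false ∧ pvL3.contains x = false ∧ pvL4.contains x = true) := by
  by_cases h0 : "pdf" = x
  · subst h0; decide
  by_cases h1 : "docx" = x
  · subst h1; decide
  by_cases h2 : "txt" = x
  · subst h2; decide
  by_cases h3 : "html" = x
  · subst h3; decide
  by_cases h4 : "rtf" = x
  · subst h4; decide
  by_cases h5 : "odt" = x
  · subst h5; decide
  by_cases h6 : "jpg" = x
  · subst h6; decide
  by_cases h7 : "jpeg" = x
  · subst h7; decide
  by_cases h8 : "png" = x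
  · subst h8; decide
  by_cases h9 : "webp" = x
  · subst h9; decide
  by_cases h10 : "svg" = x
  · subst h10; decide
  by_cases h11 : "gif" = x
  · subst h11; decide
  by_cases h12 : "bmp" = x
  · subst h12; decide
  by_cases h13 : "tiff" = x
  · subst h13; decide
  by_cases h14 : "mp4" = x
  · subst h14; decide
  by_cases h15 : "avi" = x
  · subst h15; decide
  by_cases h16 : "mov" = x
  · subst h16; decide
  by_cases h17 : "mkv" = x
  · subst h17; decide
  by_cases h18 : "flv" = x
  · subst h18; decide
  by_cases h19 : "mp3" = x
  · subst h19; decide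
  by_cases h20 : "wav" = x
  · subst h20; decide
  by_cases h21 : "aac" = x
  · subst h21; decide
  by_cases h22 : "flac" = x
  · subst h22; decide
  by_cases h23 : "ogg" = x
  · subst h23; decide
  by_cases h24 : "xlsx" = x
  · subst h24; decide
  by_cases h25 : "xls" = x
  · subst h25; decide
  by_cases h26 : "csv" = x
  · subst h26; decide
  by_cases h27 : "json" = x
  · subst h27; decide
  by_cases h28 : "tsv" = x
  · subst h28; decide
  left
  have hitems : get_supported_formats.items = [("document", pvL1), ("image", pvL2), ("audio_video", pvL3), ("spreadsheet", pvL4)] := by decide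
  have h0s : ¬x = "pdf" := fun h => h0 h.symm
  have h1s : ¬x = "docx" := fun h => h1 h.symm
  have h2s : ¬x = "txt" := fun h => h2 h.symm
  have h3s : ¬x = "html" := fun h => h3 h.symm
  have h4s : ¬x = "rtf" := fun h => h4 h.symm
  have h5s : ¬x = "odt" := fun h => h5 h.symm
  have h6s : ¬x = "jpg" := fun h => h6 h.symm
  have h7s : ¬x = "jpeg" := fun h => h7 h.symm
  have h8s : ¬x = "png" := fun h => h8 h.symm
  have h9s : ¬x = "webp" := fun h => h9 h.symm
  have h10s : ¬x = "svg" := fun h => h10 h.symm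
  have h11s : ¬x = "gif" := fun h => h11 h.symm
  have h12s : ¬x = "bmp" := fun h => h12 h.symm
  have h13s : ¬x = "tiff" := fun h => h13 h.symm
  have h14s : ¬x = "mp4" := fun h => h14 h.symm
  have h15s : ¬x = "avi" := fun h => h15 h.symm
  have h16s : ¬x = "mov" := fun h => h16 h.symm
  have h17s : ¬x = "mkv" := fun h => h17 h.symm
  have h18s : ¬x = "flv" := fun h => h18 h.symm
  have h19s : ¬x = "mp3" := fun h => h19 h.symm
  have h20s : ¬x = "wav" := fun h => h20 h.symm
  have h21s : ¬x = "aac" := fun h => h21 h.symm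
  have h22s : ¬x = "flac" := fun h => h22 h.symm
  have h23s : ¬x = "ogg" := fun h => h23 h.symm
  have h24s : ¬x = "xlsx" := fun h => h24 h.symm
  have h25s : ¬x = "xls" := fun h => h25 h.symm
  have h26s : ¬x = "csv" := fun h => h26 h.symm
  have h27s : ¬x = "json" := fun h => h27 h.symm
  have h28s : ¬x = "tsv" := fun h => h28 h.symm
  simp [pvLoopCat, hitems, pvL1, pvL2, pvL3, pvL4, List.foldl, h0s, h1s, h2s, h3s, h4s, h5s, h6s, h7s, h8s,
    h9s, h10s, h11s, h12s, h13s, h14s, h15s, h16s, h17s, h18s, h19s, h20s, h21s, h22s, h23s,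
    h24s, h25s, h26s, h27s, h28s]

lemma pv_values : get_supported_formats.values = [pvL1, pvL2, pvL3, pvL4] := by decide

lemma pv_if_mem (x y : String) (l : List String) :
    (if y ∈ l then ((true, "Valid conversion") : Bool × String)
     else (false, "Cannot convert " ++ x ++ " to " ++ y ++ " - different categories"))
    = (if l.contains y = true then (true, "Valid conversion")
       else (false, "Cannot convert " ++ x ++ " to " ++ y ++ " - different categories")) := by
  by_cases h : y ∈ l <;> simp [h]

lemma pv_core (x y : String) :
    (match pvLoopCat x with
     | none => ((false, "Unsupported source file type") : Bool × String)
     | some c =>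
       if y ∈ (get_supported_formats.get? c).getD [] then (true, "Valid conversion")
       else (false, "Cannot convert " ++ x ++ " to " ++ y ++ " - different categories"))
    = (if !([pvL1, pvL2, pvL3, pvL4].any (fun fl => fl.contains x)) then
         ((false, "Unsupported source file type") : Bool × String)
       else if [pvL1, pvL2, pvL3, pvL4].any (fun fl => fl.contains x && fl.contains y) then
         (true, "Valid conversion")
       else (false, "Cannot convert " ++ x ++ " to " ++ y ++ " - different categories")) := by
  have e1 : (get_supported_formats.get? "document").getD [] = pvL1 := by decide
  have e2 : (get_supported_formats.get? "image").getD [] = pvL2 := by decide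
  have e3 : (get_supported_formats.get? "audio_video").getD [] = pvL3 := by decide
  have e4 : (get_supported_formats.get? "spreadsheet").getD [] = pvL4 := by decide
  rcases pv_master x with ⟨hl, c1, c2, c3, c4⟩ | ⟨hl, c1, c2, c3, c4⟩ | ⟨hl, c1, c2, c3, c4⟩
    | ⟨hl, c1, c2, c3, c4⟩ | ⟨hl, c1, c2, c3, c4⟩ <;>
    rw [hl] <;>
    simp only [List.any_cons, List.any_nil, c1, c2, c3, c4, Bool.false_and, Bool.true_and,
      Bool.false_or, Bool.or_false, Bool.not_false, Bool.not_true, e1, e2, e3, e4,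
      if_true, if_false, Bool.false_eq_true] <;>
    first | rfl | exact pv_if_mem x y _

-- ===== VERDICT (by name: the statement is the Claim_ definition above) =====
theorem validate_conversion_spec : Claim_equal_validate_conversion := by
  intro source_ext target_format _
  unfold Spec_validate_conversion validate_conversion validate_conversion_alt
  rw [pv_values]
  exact pv_core (PySem.Str.lower source_ext) (PySem.Str.lower target_format)
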